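-- pv_equiv track=rewrite | github.com/StudyForCoding/ProgrammersLevel | Level1/Lessons12933/hakamma.py | solution
-- ===== SOURCE A (Python) =====
-- def solution(n):
--     answer = 0
--     n_number = str(n)
--     t = []
--     for i in range(len(n_number)):
--         t.append(int(n_number[len(n_number)-i-1]))
--
--     t.sort(reverse=True)
--     s=''.join(map(str,t)) # 리스트를 특정 구분자를 포함해 문자열로 변환
--     answer = int(s)
--     return answer
-- ===== SOURCE B (Python) =====
-- def solution(n):
--     counts = [0] * 10
--     for ch in str(n):
--         counts[int(ch)] += 1
--     s = ''
--     for d in range(9, -1, -1):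
--         s += str(d) * counts[d]
--     return int(s)
-- ===== Notes on version B (the rewrite author's own statement) =====
-- stated objective: alternative
-- what changed: Replaces the reversed-index extraction plus comparison sort (list.sort(reverse=True)) with a counting sort: one pass builds a fixed 10-slot digit frequency table, then the result string is emitted by walking digits 9 down to 0.
import Mathlib
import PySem

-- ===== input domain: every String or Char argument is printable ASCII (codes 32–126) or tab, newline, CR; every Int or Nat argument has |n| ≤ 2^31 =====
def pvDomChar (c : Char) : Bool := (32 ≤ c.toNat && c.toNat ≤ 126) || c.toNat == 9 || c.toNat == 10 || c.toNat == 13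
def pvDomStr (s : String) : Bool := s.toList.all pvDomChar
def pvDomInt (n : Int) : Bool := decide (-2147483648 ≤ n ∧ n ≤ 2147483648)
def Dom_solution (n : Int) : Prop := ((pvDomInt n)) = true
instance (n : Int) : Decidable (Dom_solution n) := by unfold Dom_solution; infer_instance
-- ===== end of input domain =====

-- B replaces A's reversed-index digit extraction + comparison sort by a one-pass
-- 10-slot digit-frequency table emitted from 9 down to 0 (counting sort); objective: alternative.

-- ===== PORT A =====
-- str/int are ported through PySem (toChars / ofChars?, exact); indexing via pyGetD is
-- total only because the index len-i-1 is provably in range; the .getD 0 on int()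
-- results is reached only where Python's int() would raise (excluded by Pre_solution).
def solution (n : Int) : Int :=
  let n_number := PySem.Int.toChars n                     -- n_number = str(n)
  let t : List Int :=                                     -- for i in range(len(n_number)): t.append(int(n_number[len-i-1]))
    (PySem.List.pyRange 0 (PySem.List.len n_number) 1).foldl
      (fun t i =>
        t ++ [(PySem.Int.ofChars? [PySem.List.pyGetD n_number (PySem.List.len n_number - i - 1) '0']).getD 0]) []
  let t := PySem.List.sorted t (fun x => x) true          -- t.sort(reverse=True)
  let s := (t.map PySem.Int.toChars).flatten              -- s = ''.join(map(str, t))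
  (PySem.Int.ofChars? s).getD 0                           -- answer = int(s)

-- ===== PORT B =====
def solution_alt (n : Int) : Int :=
  let counts : List Int := List.replicate 10 0            -- counts = [0] * 10
  let counts := (PySem.Int.toChars n).foldl               -- for ch in str(n): counts[int(ch)] += 1
    (fun counts ch =>
      let d := (PySem.Int.ofChars? [ch]).getD 0
      PySem.List.pySetD counts d (PySem.List.pyGetD counts d 0 + 1)) counts
  let s := (PySem.List.pyRange 9 (-1) (-1)).foldl         -- for d in range(9,-1,-1): s += str(d) * counts[d]
    (fun s d => s ++ PySem.List.pyRepeat (PySem.Int.toChars d) (PySem.List.pyGetD counts d 0)) ([] : List Char)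
  (PySem.Int.ofChars? s).getD 0                           -- return int(s)

-- ===== PRECONDITION & SPEC =====
-- Pre_ excludes exactly the inputs where A raises: for n < 0, str(n) contains '-' and
-- int('-') raises ValueError inside A's loop (B raises there too).
def Pre_solution (n : Int) : Prop := 0 ≤ n
instance (n : Int) : Decidable (Pre_solution n) := by unfold Pre_solution; infer_instance
def pvWitness_solution : Int := 20250918
def Spec_solution (n : Int) (out : Int) : Prop := out = solution_alt n
instance (n : Int) (out : Int) : Decidable (Spec_solution n out) := by unfold Spec_solution; infer_instance

-- ===== CLAIM (what is proved, stated in full; the proofs are below) =====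
def Claim_equal_solution : Prop := ∀ (n : Int), Dom_solution n → Pre_solution n → Spec_solution n (solution n)

-- ===== LEMMAS AND PROOFS =====

-- value of a one-character string under int(), as both ports compute it
def pvDv (c : Char) : Int := (PySem.Int.ofChars? [c]).getD 0
-- the 10-slot frequency table of a value list
def pvTbl (vs : List Int) : List Int :=
  [(vs.count 0 : Int), (vs.count 1 : Int), (vs.count 2 : Int), (vs.count 3 : Int),
   (vs.count 4 : Int), (vs.count 5 : Int), (vs.count 6 : Int), (vs.count 7 : Int),
   (vs.count 8 : Int), (vs.count 9 : Int)]
-- the descending arrangement of a value list with entries in 0..9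
def pvDesc (vs : List Int) : List Int :=
  ([9, 8, 7, 6, 5, 4, 3, 2, 1, 0] : List Int).flatMap (fun d => List.replicate (vs.count d) d)

-- every character produced by Nat.toDigitsCore is a digit character (or came from the accumulator)
lemma pv_toDigitsCore_mem (f : Nat) : ∀ (m : Nat) (acc : List Char) (c : Char),
    c ∈ Nat.toDigitsCore 10 f m acc → c ∈ acc ∨ ∃ k, k < 10 ∧ c = Nat.digitChar k := by
  induction f with
  | zero => intro m acc c h; exact Or.inl h
  | succ f ih =>
    intro m acc c h
    simp only [Nat.toDigitsCore] at h
    by_cases hm : m / 10 = 0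
    · simp only [hm] at h
      rcases List.mem_cons.mp h with h | h
      · exact Or.inr ⟨m % 10, Nat.mod_lt _ (by norm_num), h⟩
      · exact Or.inl h
    · rw [if_neg hm] at h
      rcases ih (m / 10) (Nat.digitChar (m % 10) :: acc) c h with h | h
      · rcases List.mem_cons.mp h with h | h
        · exact Or.inr ⟨m % 10, Nat.mod_lt _ (by norm_num), h⟩
        · exact Or.inl h
      · exact Or.inr h

lemma pv_dv_digitChar (k : Nat) (hk : k < 10) :
    0 ≤ pvDv (Nat.digitChar k) ∧ pvDv (Nat.digitChar k) ≤ 9 := by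
  interval_cases k <;> exact ⟨by decide, by decide⟩

lemma pv_chars_range (n : Int) (h : 0 ≤ n) :
    ∀ c ∈ PySem.Int.toChars n, 0 ≤ pvDv c ∧ pvDv c ≤ 9 := by
  intro c hc
  simp only [PySem.Int.toChars, if_neg (by omega : ¬ n < 0)] at hc
  rcases pv_toDigitsCore_mem _ _ _ _ hc with h' | ⟨k, hk, rfl⟩
  · simp at h'
  · exact pv_dv_digitChar k hk

-- A's extraction loop produces the reversed digit-value list
lemma pv_A_loop (l : List Char) :
    (PySem.List.pyRange 0 (PySem.List.len l) 1).foldl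
      (fun t i => t ++ [(PySem.Int.ofChars? [PySem.List.pyGetD l (PySem.List.len l - i - 1) '0']).getD 0]) [] =
    (l.map pvDv).reverse := by
  rw [PySem.List.foldl_append_singleton_eq_map]
  simp only [PySem.List.len_eq, List.nil_append]
  rw [PySem.List.pyRange_zero_natCast, ← List.map_reverse, List.map_map]
  apply List.ext_getElem
  · simp
  · intro j h1 h2
    simp only [List.getElem_map, List.getElem_range, Function.comp_apply, List.getElem_reverse]
    simp only [List.length_map, List.length_range] at h1
    have hidx : ((l.length : Int) - (j : Int) - 1) = ((l.length - 1 - j : Nat) : Int) := by omega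
    rw [hidx, PySem.List.pyGetD_eq_getElem l '0' (by omega) (by omega)]
    simp [pvDv]

-- one step of B's counting loop updates the frequency table
lemma pv_B_step (vs : List Int) (c : Char) (h0 : 0 ≤ pvDv c) (h9 : pvDv c ≤ 9) :
    PySem.List.pySetD (pvTbl vs) (pvDv c) (PySem.List.pyGetD (pvTbl vs) (pvDv c) 0 + 1) =
    pvTbl (vs ++ [pvDv c]) := by
  obtain ⟨k, hk, hdc⟩ : ∃ k : Nat, k ≤ 9 ∧ pvDv c = (k : Int) :=
    ⟨(pvDv c).toNat, by omega, by omega⟩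
  rw [hdc, PySem.List.pyGetD_natCast, PySem.List.pySetD_natCast]
  interval_cases k <;>
    simp [pvTbl, List.count_append]

-- B's counting loop builds the frequency table of the digit values
lemma pv_B_loop (cs : List Char) (vs : List Int)
    (h : ∀ c ∈ cs, 0 ≤ pvDv c ∧ pvDv c ≤ 9) :
    cs.foldl
      (fun counts ch =>
        PySem.List.pySetD counts ((PySem.Int.ofChars? [ch]).getD 0)
          (PySem.List.pyGetD counts ((PySem.Int.ofChars? [ch]).getD 0) 0 + 1)) (pvTbl vs) =
    pvTbl (vs ++ cs.map pvDv) := by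
  induction cs generalizing vs with
  | nil => simp
  | cons c cs ih =>
    have hc := h c (by simp)
    simp only [List.foldl_cons]
    rw [show ((PySem.Int.ofChars? [c]).getD 0) = pvDv c from rfl,
      pv_B_step vs c hc.1 hc.2, ih (vs ++ [pvDv c]) (fun x hx => h x (by simp [hx]))]
    simp

lemma pv_tbl_nil : List.replicate 10 (0 : Int) = pvTbl [] := by decide

-- pvDesc is a permutation of its argument, when all entries lie in 0..9
lemma pv_desc_perm (vs : List Int) (h : ∀ v ∈ vs, 0 ≤ v ∧ v ≤ 9) : (pvDesc vs).Perm vs := by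
  rw [List.perm_iff_count]
  intro a
  simp only [pvDesc, List.flatMap_cons, List.flatMap_nil, List.append_nil,
    List.count_append, List.count_replicate, beq_iff_eq]
  by_cases ha : 0 ≤ a ∧ a ≤ 9
  · obtain ⟨k, hk, rfl⟩ : ∃ k : Nat, k ≤ 9 ∧ a = (k : Int) := ⟨a.toNat, by omega, by omega⟩
    interval_cases k <;> norm_num
  · have hz : vs.count a = 0 :=
      List.count_eq_zero.mpr (fun hm => ha ⟨(h a hm).1, (h a hm).2⟩)
    rw [hz, if_neg (by omega), if_neg (by omega), if_neg (by omega), if_neg (by omega),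
      if_neg (by omega), if_neg (by omega), if_neg (by omega), if_neg (by omega),
      if_neg (by omega), if_neg (by omega)]

-- a flatMap of replicates over a strictly decreasing digit list is descending
lemma pv_flatMap_pairwise (k : List Int → Int → Nat) (vs : List Int) :
    ∀ (ds : List Int), ds.Pairwise (fun a b => b < a) →
      (ds.flatMap (fun d => List.replicate (k vs d) d)).Pairwise (fun a b => b ≤ a) := by
  intro ds
  induction ds with
  | nil => intro _; simp
  | cons d ds ih =>
    intro hp
    rw [List.pairwise_cons] at hp
    simp only [List.flatMap_cons]
    rw [List.pairwise_append]
    refine ⟨List.pairwise_replicate.mpr (Or.inr le_rfl), ih hp.2, ?_⟩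
    intro a ha b hb
    rcases List.eq_of_mem_replicate ha with rfl
    rcases List.mem_flatMap.mp hb with ⟨d', hd', hb'⟩
    rcases List.eq_of_mem_replicate hb' with rfl
    exact le_of_lt (hp.1 _ hd')

lemma pv_desc_pairwise (vs : List Int) : (pvDesc vs).Pairwise (fun a b => b ≤ a) :=
  pv_flatMap_pairwise (fun vs d => vs.count d) vs _ (by decide)

-- the Python sort reverse=True equals the counting-sort arrangement
lemma pv_sorted_eq_desc (vs : List Int) (h : ∀ v ∈ vs, 0 ≤ v ∧ v ≤ 9) :
    PySem.List.sorted vs (fun x => x) true = pvDesc vs := by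
  refine List.Perm.eq_of_pairwise (le := fun a b : Int => b ≤ a)
    (fun a b _ _ hab hba => le_antisymm hba hab) ?_ (pv_desc_pairwise vs)
    (((PySem.List.sorted_perm vs (fun x => x) true)).trans (pv_desc_perm vs h).symm)
  exact PySem.List.sorted_pairwise_rev vs (fun x => x)

-- A's joined string of the descending values equals B's emitted string
lemma pv_strings_eq (vs : List Int) :
    ((pvDesc vs).map PySem.Int.toChars).flatten =
    (PySem.List.pyRange 9 (-1) (-1)).foldl
      (fun s d => s ++ PySem.List.pyRepeat (PySem.Int.toChars d) (PySem.List.pyGetD (pvTbl vs) d 0)) [] := by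
  have hr : PySem.List.pyRange 9 (-1) (-1) = [9, 8, 7, 6, 5, 4, 3, 2, 1, 0] := by decide
  rw [hr]
  simp only [List.foldl_cons, List.foldl_nil, List.nil_append]
  simp only [pvDesc, List.flatMap_cons, List.flatMap_nil, List.append_nil, List.map_append,
    List.map_replicate, List.flatten_append]
  rw [show PySem.Int.toChars 9 = ['9'] from rfl, show PySem.Int.toChars 8 = ['8'] from rfl,
    show PySem.Int.toChars 7 = ['7'] from rfl, show PySem.Int.toChars 6 = ['6'] from rfl,
    show PySem.Int.toChars 5 = ['5'] from rfl, show PySem.Int.toChars 4 = ['4'] from rfl,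
    show PySem.Int.toChars 3 = ['3'] from rfl, show PySem.Int.toChars 2 = ['2'] from rfl,
    show PySem.Int.toChars 1 = ['1'] from rfl, show PySem.Int.toChars 0 = ['0'] from rfl]
  simp [pvTbl, PySem.List.pyGetD_ofNat', PySem.List.pyRepeat_singleton, List.append_assoc]

-- ===== VERDICT (by name: the statement is the Claim_ definition above) =====
theorem solution_spec : Claim_equal_solution := by
  intro n _ hpre
  unfold Spec_solution
  simp only [solution, solution_alt]
  have hrange := pv_chars_range n hpre
  set l := PySem.Int.toChars n with hl
  have hvr : ∀ v ∈ l.map pvDv, 0 ≤ v ∧ v ≤ 9 := by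
    intro v hv
    rcases List.mem_map.mp hv with ⟨c, hc, rfl⟩
    exact hrange c hc
  have hvrr : ∀ v ∈ (l.map pvDv).reverse, 0 ≤ v ∧ v ≤ 9 := by
    intro v hv; exact hvr v (List.mem_reverse.mp hv)
  rw [pv_A_loop l, pv_tbl_nil, pv_B_loop l [] hrange, List.nil_append,
    pv_sorted_eq_desc _ hvrr]
  have hdesc : pvDesc ((l.map pvDv).reverse) = pvDesc (l.map pvDv) := by
    simp [pvDesc, List.count_reverse]
  rw [hdesc, pv_strings_eq (l.map pvDv)]
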